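-- pv_equiv track=rewrite | github.com/pypi-data/pypi-mirror-397 | packages/stacksense-cli/stacksense_cli-0.1.3.tar.gz/stacksense_cli-0.1.3/src/stacksense/core/citation_fixer.py | _find_best_file_match
-- ===== SOURCE A (Python) =====
-- from typing import Dict, Any, List, Tuple
--
-- def _find_best_file_match(sentence_lower: str, file_index: Dict[str, str]) -> str:
--     """
--     Find which file sentence is about.
--     Scores by specificity (longer matches = more specific).
--     """
--     best_match = None
--     best_score = 0
--
--     for identifier, file_name in file_index.items():
--         if identifier in sentence_lower:
--             # Score by identifier length (longer = more specific)
--             # e.g., "authentication_handler" beats "auth"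
--             score = len(identifier)
--
--             if score > best_score:
--                 best_score = score
--                 best_match = file_name
--
--     return best_match
-- ===== SOURCE B (Python) =====
-- def _find_best_file_match(sentence_lower: str, file_index: dict) -> str:
--     """
--     Find which file the sentence is about, in two phases instead of a
--     tracked best/score accumulator: compute the best specificity score
--     (the longest matching identifier's length; 0 means nothing matched),
--     then return the file of the first identifier achieving that score.
--     """
--     best_score = max((len(i) for i in file_index if i in sentence_lower), default=0)
--     if best_score == 0:
--         return None
--     for identifier, file_name in file_index.items():
--         if len(identifier) == best_score and identifier in sentence_lower:
--             return file_name
-- ===== Notes on version B (the rewrite author's own statement) =====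
-- stated objective: idiomatic
-- what changed: Replaces A's single pass with a tracked (best_match, best_score) accumulator by a two-phase decomposition: max() over a generator computes the best specificity score (0 = no match), then a scan returns the first identifier achieving that score.
import Mathlib
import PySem

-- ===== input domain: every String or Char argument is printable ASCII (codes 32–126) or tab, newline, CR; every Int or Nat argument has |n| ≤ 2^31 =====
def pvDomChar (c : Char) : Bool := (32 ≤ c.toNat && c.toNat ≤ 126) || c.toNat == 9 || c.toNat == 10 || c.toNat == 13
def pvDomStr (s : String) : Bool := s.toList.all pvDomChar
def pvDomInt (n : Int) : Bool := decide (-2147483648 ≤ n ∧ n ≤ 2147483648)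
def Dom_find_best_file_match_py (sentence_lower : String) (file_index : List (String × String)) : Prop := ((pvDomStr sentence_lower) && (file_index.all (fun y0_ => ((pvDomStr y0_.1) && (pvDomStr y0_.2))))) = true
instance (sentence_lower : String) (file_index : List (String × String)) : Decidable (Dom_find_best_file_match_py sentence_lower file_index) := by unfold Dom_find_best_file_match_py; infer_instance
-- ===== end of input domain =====

-- B replaces A's tracked best/score accumulator by a two-phase decomposition (best score = longest matching identifier's length, 0 = no match; then first identifier achieving it); same asymptotic cost, proved equal on all inputs.


-- ===== PORT A =====
-- A's loop body: if identifier in sentence and its length beats the best score, record (file, length)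
def pvStepA (sentence_lower : String) (acc : Option String × Int) (kv : String × String) : Option String × Int :=
  if PySem.Str.isIn kv.1 sentence_lower then
    let score := PySem.Str.len kv.1
    if acc.2 < score then (some kv.2, score) else acc
  else acc

def find_best_file_match_py (sentence_lower : String) (file_index : List (String × String)) : Option String :=
  (file_index.foldl (pvStepA sentence_lower) (none, 0)).1

-- ===== PORT B =====
-- the comprehension [len(i) for i in file_index if i in sentence_lower]
def pvLengths (sentence_lower : String) (file_index : List (String × String)) : List Int :=
  ((file_index.map Prod.fst).filter (fun i => PySem.Str.isIn i sentence_lower)).map PySem.Str.len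

-- max(gen, default=0): default on the empty generator, running max otherwise
def find_best_file_match_py_alt (sentence_lower : String) (file_index : List (String × String)) : Option String :=
  let best_score :=
    match pvLengths sentence_lower file_index with
    | [] => (0 : Int)
    | x :: t => t.foldl max x
  if best_score == 0 then none
  else
    (file_index.find? (fun kv => PySem.Str.len kv.1 == best_score && PySem.Str.isIn kv.1 sentence_lower)).map Prod.snd

-- ===== PRECONDITION & SPEC =====
def Spec_find_best_file_match_py (sentence_lower : String) (file_index : List (String × String)) (out : Option String) : Prop := out = find_best_file_match_py_alt sentence_lower file_index
instance (sentence_lower : String) (file_index : List (String × String)) (out : Option String) : Decidable (Spec_find_best_file_match_py sentence_lower file_index out) := by unfold Spec_find_best_file_match_py; infer_instance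

-- ===== CLAIM (what is proved, stated in full; the proofs are below) =====
def Claim_equal_find_best_file_match_py : Prop := ∀ (sentence_lower : String) (file_index : List (String × String)), Dom_find_best_file_match_py sentence_lower file_index → Spec_find_best_file_match_py sentence_lower file_index (find_best_file_match_py sentence_lower file_index)

-- ===== LEMMAS AND PROOFS =====

-- the condition under which A's running best is replaced, seen from the right
abbrev pvCond (s : String) (kv : String × String) (r : Option String × Int) : Prop :=
  PySem.Str.isIn kv.1 s = true ∧ r.2 ≤ PySem.Str.len kv.1 ∧ 0 < PySem.Str.len kv.1

-- proof-side recursive characterisation of A's fold: first identifier of maximal (positive) length that matches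
def pvF (s : String) : List (String × String) → Option String × Int
  | [] => (none, 0)
  | kv :: t =>
    let r := pvF s t
    if pvCond s kv r then (some kv.2, PySem.Str.len kv.1) else r

lemma pvF_nonneg (s : String) (l : List (String × String)) : 0 ≤ (pvF s l).2 := by
  induction l with
  | nil => simp [pvF]
  | cons kv t ih =>
    simp only [pvF]; split
    case isTrue h => have := h.2.2; omega
    case isFalse => exact ih

lemma pvF_cons_pos (s : String) (kv : String × String) (t : List (String × String))
    (h : pvCond s kv (pvF s t)) : pvF s (kv :: t) = (some kv.2, PySem.Str.len kv.1) := by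
  simp only [pvF]; rw [if_pos h]

lemma pvF_cons_neg (s : String) (kv : String × String) (t : List (String × String))
    (h : ¬ pvCond s kv (pvF s t)) : pvF s (kv :: t) = pvF s t := by
  simp only [pvF]; rw [if_neg h]

lemma pvStepA_of_isIn (s : String) (b : Option String) (sc : Int) (kv : String × String)
    (hin : PySem.Str.isIn kv.1 s = true) :
    pvStepA s (b, sc) kv = if sc < PySem.Str.len kv.1 then (some kv.2, PySem.Str.len kv.1) else (b, sc) := by
  simp only [pvStepA, hin, if_true]

lemma pvStepA_of_not_isIn (s : String) (b : Option String) (sc : Int) (kv : String × String)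
    (hin : PySem.Str.isIn kv.1 s = false) :
    pvStepA s (b, sc) kv = (b, sc) := by
  simp only [pvStepA, hin, Bool.false_eq_true, if_false]

-- A's fold from any accumulator with a nonnegative score
lemma pvFoldA (s : String) (l : List (String × String)) (b : Option String) (sc : Int) (hsc : 0 ≤ sc) :
    l.foldl (pvStepA s) (b, sc) = if sc < (pvF s l).2 then pvF s l else (b, sc) := by
  induction l generalizing b sc with
  | nil => simp only [List.foldl_nil, pvF]; rw [if_neg (by omega)]
  | cons kv t ih =>
    have hnn := pvF_nonneg s t
    simp only [List.foldl_cons]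
    by_cases hin : PySem.Str.isIn kv.1 s = true
    · rw [pvStepA_of_isIn s b sc kv hin]
      by_cases hC : pvCond s kv (pvF s t)
      · rw [pvF_cons_pos s kv t hC]
        have h1 := hC.2.1
        by_cases hsl : sc < PySem.Str.len kv.1
        · rw [if_pos hsl, ih _ _ (by omega)]
          rw [if_neg (show ¬ (some kv.2, PySem.Str.len kv.1).2 < (pvF s t).2 from by omega)]
        · rw [if_neg hsl, ih _ _ hsc]
          rw [if_neg (show ¬ sc < (pvF s t).2 from by omega)]
      · rw [pvF_cons_neg s kv t hC]
        by_cases hsl : sc < PySem.Str.len kv.1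
        · have hrL : PySem.Str.len kv.1 < (pvF s t).2 := by
            by_contra h
            exact hC ⟨hin, by omega, by omega⟩
          rw [if_pos hsl, ih _ _ (by omega)]
          rw [if_pos (show (some kv.2, PySem.Str.len kv.1).2 < (pvF s t).2 from hrL),
              if_pos (show sc < (pvF s t).2 from by omega)]
        · rw [if_neg hsl, ih _ _ hsc]
    · have hin' : PySem.Str.isIn kv.1 s = false := by simpa using hin
      rw [pvStepA_of_not_isIn s b sc kv hin', ih _ _ hsc,
          pvF_cons_neg s kv t (fun h => hin h.1)]

lemma pvLengths_cons (s : String) (kv : String × String) (t : List (String × String)) :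
    pvLengths s (kv :: t) =
      if PySem.Str.isIn kv.1 s then PySem.Str.len kv.1 :: pvLengths s t
      else pvLengths s t := by
  simp only [pvLengths, List.map_cons, List.filter_cons]
  split_ifs with h <;> simp

-- every length in the comprehension is nonnegative
lemma pvLengths_nonneg (s : String) (l : List (String × String)) : ∀ y ∈ pvLengths s l, 0 ≤ y := by
  intro y hy
  simp only [pvLengths, List.mem_map, List.mem_filter] at hy
  obtain ⟨i, _, rfl⟩ := hy
  rw [PySem.Str.len_eq]; positivity

-- running max commutes out
lemma pvFoldlMaxComm (l : List Int) (a b : Int) :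
    l.foldl max (max a b) = max a (l.foldl max b) := by
  induction l generalizing b with
  | nil => rfl
  | cons c t ih => simpa [max_assoc] using ih (max b c)

-- pvF's score is the running max of the comprehension's lengths
lemma pvF_score (s : String) (l : List (String × String)) :
    (pvF s l).2 = (pvLengths s l).foldl max 0 := by
  induction l with
  | nil => simp [pvF, pvLengths]
  | cons kv t ih =>
    rw [pvLengths_cons]
    by_cases hin : PySem.Str.isIn kv.1 s = true
    · by_cases hL0 : PySem.Str.len kv.1 = 0
      · rw [if_pos hin, List.foldl_cons, hL0, max_self,
            pvF_cons_neg s kv t (fun h => by have := h.2.2; omega), ih]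
      · have hnn0 : 0 ≤ PySem.Str.len kv.1 := by rw [PySem.Str.len_eq]; positivity
        have hL : 0 < PySem.Str.len kv.1 := by omega
        rw [if_pos hin]
        rw [List.foldl_cons, max_comm 0 (PySem.Str.len kv.1),
            pvFoldlMaxComm (pvLengths s t) (PySem.Str.len kv.1) 0, ← ih]
        have hnn := pvF_nonneg s t
        by_cases hC : pvCond s kv (pvF s t)
        · rw [pvF_cons_pos s kv t hC]
          have := hC.2.1
          show PySem.Str.len kv.1 = _
          omega
        · have : ¬ (pvF s t).2 ≤ PySem.Str.len kv.1 := fun h => hC ⟨hin, h, hL⟩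
          rw [pvF_cons_neg s kv t hC]
          omega
    · have hin' : PySem.Str.isIn kv.1 s = false := by simpa using hin
      rw [if_neg (by rw [hin']; simp)]
      rw [pvF_cons_neg s kv t (fun h => hin h.1), ih]

-- pvF's match is the first identifier of maximal length that matches
lemma pvF_first (s : String) (l : List (String × String)) (m : Int)
    (hm : (pvF s l).2 = m) (hpos : 0 < m) :
    (pvF s l).1 = (l.find? (fun kv => PySem.Str.len kv.1 == m && PySem.Str.isIn kv.1 s)).map Prod.snd := by
  induction l with
  | nil => simp [pvF] at hm; omega
  | cons kv t ih =>
    by_cases hC : pvCond s kv (pvF s t)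
    · rw [pvF_cons_pos s kv t hC] at hm ⊢
      simp only at hm
      rw [List.find?_cons_of_pos (by rw [hC.1, Bool.and_true, hm]; exact beq_self_eq_true m)]
      simp
    · rw [pvF_cons_neg s kv t hC] at hm ⊢
      have hpred : (PySem.Str.len kv.1 == m && PySem.Str.isIn kv.1 s) = false := by
        by_cases hin : PySem.Str.isIn kv.1 s = true
        · have hnotle : ¬ ((pvF s t).2 ≤ PySem.Str.len kv.1 ∧ 0 < PySem.Str.len kv.1) :=
            fun h => hC ⟨hin, h.1, h.2⟩
          have hne : PySem.Str.len kv.1 ≠ m := by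
            intro heq; exact hnotle ⟨by omega, by omega⟩
          rw [beq_eq_false_iff_ne.mpr hne, Bool.false_and]
        · rw [Bool.eq_false_iff.mpr hin, Bool.and_false]
      simp only [List.find?_cons, hpred]
      exact ih hm

-- ===== VERDICT (by name: the statement is the Claim_ definition above) =====
theorem find_best_file_match_py_spec : Claim_equal_find_best_file_match_py := by
  intro s l _
  unfold Spec_find_best_file_match_py find_best_file_match_py find_best_file_match_py_alt
  rw [pvFoldA s l none 0 le_rfl]
  have hnn := pvF_nonneg s l
  have hscore := pvF_score s l
  cases hl : pvLengths s l with
  | nil =>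
    rw [hl] at hscore; simp only [List.foldl_nil] at hscore
    simp only [hl]
    rw [if_neg (by omega), if_pos (by decide)]
  | cons x lt =>
    have hxnn : 0 ≤ x := pvLengths_nonneg s l x (by rw [hl]; simp)
    have hmax : (x :: lt).foldl max 0 = lt.foldl max x := by
      rw [List.foldl_cons, max_eq_right hxnn]
    rw [hl, hmax] at hscore
    simp only [hl]
    simp only [← hscore]
    by_cases h0 : 0 < (pvF s l).2
    · rw [if_pos h0, if_neg (by simp; omega)]
      exact pvF_first s l ((pvF s l).2) rfl h0
    · rw [if_neg h0, if_pos (by simp; omega)]
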